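-- pv_equiv track=rewrite | github.com/ridassaf/islands | repeatFeatures.py | numDirectAcross
-- ===== SOURCE A (Python) =====
-- def numDirectAcross(seq, seq2,  j):
-- 	num_direct = 0
-- 	current_seq = ''
-- 	for i in range(len(seq)):
-- 		if i < j:
-- 			current_seq += seq[i]
-- 		else:
-- 			if current_seq in seq2:
-- 				num_direct += 1
-- 				return num_direct
-- 			current_seq = current_seq[1:] + seq[i]
-- 	return num_direct
-- ===== SOURCE B (Python) =====
-- def numDirectAcross(seq, seq2, j):
--     base, mod = 1000003, (1 << 61) - 1
--
--     def window_hashes(s):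
--         hs = []
--         if 1 <= j <= len(s):
--             h = 0
--             for c in s[:j]:
--                 h = (h * base + ord(c)) % mod
--             hs.append(h)
--             top = pow(base, j - 1, mod)
--             for k in range(j, len(s)):
--                 h = ((h - ord(s[k - j]) * top) * base + ord(s[k])) % mod
--                 hs.append(h)
--         return hs
--
--     hs2 = window_hashes(seq2)
--     hset = set(hs2)
--     return 1 if any(
--         h in hset and any(seq[k:k + j] == seq2[m:m + j]
--                           for m, h2 in enumerate(hs2) if h2 == h)
--         for k, h in enumerate(window_hashes(seq))) else 0
-- ===== Notes on version B (the rewrite author's own statement) =====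
-- stated objective: faster
-- what changed: Replaces the rolling-window loop that substring-searches seq2 at every position with a rolling-hash set of seq2's length-j window hashes built once, then a single scan of seq's window hashes with exact slice verification on a hit; Pre_ excludes non-positive window lengths j <= 0, outside the function's natural domain, where A returns 1 for any nonempty seq (its still-empty prefix matches every string, an accident of its loop state) while B returns 0, there being no window of non-positive length; neither value is claimed.
-- intended difference: When the only length-j window of seq occurring in seq2 is the final one (starting at len(seq)-j), A returns 0 because its loop stops before ever testing that window, while B returns 1, which is the intended answer since that window does occur in seq2. — e.g. on numDirectAcross("ab", "b", 1): A returns 0, B returns 1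
-- outside the precondition, e.g. on numDirectAcross('ab', 'xy', 0): A returns 1, B returns 0
import Mathlib
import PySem

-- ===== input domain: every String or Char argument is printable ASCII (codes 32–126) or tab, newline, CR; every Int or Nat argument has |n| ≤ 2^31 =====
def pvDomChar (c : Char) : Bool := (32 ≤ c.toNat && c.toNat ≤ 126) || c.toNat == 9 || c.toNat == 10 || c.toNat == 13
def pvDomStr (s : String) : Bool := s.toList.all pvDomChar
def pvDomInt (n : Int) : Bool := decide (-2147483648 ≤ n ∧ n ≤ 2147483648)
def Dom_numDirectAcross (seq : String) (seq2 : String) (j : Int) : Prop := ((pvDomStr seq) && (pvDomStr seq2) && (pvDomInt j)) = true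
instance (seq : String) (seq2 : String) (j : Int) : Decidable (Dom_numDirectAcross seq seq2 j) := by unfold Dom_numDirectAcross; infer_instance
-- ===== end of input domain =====

-- B replaces A's per-position substring search with a rolling hash: the hashes of
-- seq2's length-j windows go into a set built once, then seq's window hashes are
-- scanned, verifying real slices on a hash hit (objective: faster); B also tests
-- the final window, which A's loop never reaches (intended difference D_ below).

-- ===== PORT A =====
-- the for-loop of A: state (num_direct, current_seq), index i over range(len(seq));
-- 'return num_direct' inside the loop becomes the non-recursive branch.
def pvA_loop (s s2 : List Char) (j : Int) (nd : Int) (cur : List Char) (i : Nat) : Int :=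
  if h : i < s.length then
    if (i : Int) < j then
      pvA_loop s s2 j nd (cur ++ [s[i]]) (i + 1)
    else if PySem.Chars.isIn cur s2 then nd + 1
    else pvA_loop s s2 j nd (PySem.List.slice cur (some 1) none ++ [s[i]]) (i + 1)
  else nd
termination_by s.length - i

def numDirectAcross (seq : String) (seq2 : String) (j : Int) : Int :=
  pvA_loop seq.toList seq2.toList j 0 [] 0

-- ===== PORT B =====
-- transliteration of Source B: rolling-hash lists of the length-j window hashes of both
-- strings, a set of seq2's hashes, then any() over seq's windows with slice
-- verification on a hash hit.  pvB_step is the body of Source B's second for-loop;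
-- s[k] / s[k-j] are always in range there, so pyGetD with a dummy default is exact.
def pvBase : Int := 1000003
def pvMod : Int := ((1 : Int) <<< 61) - 1

def pvB_step (s : List Char) (j top : Int) (st : Int × List Int) (k : Int) : Int × List Int :=
  let h := PySem.Int.mod ((st.1 - ((PySem.List.pyGetD s (k - j) 'a').toNat : Int) * top) * pvBase
    + ((PySem.List.pyGetD s k 'a').toNat : Int)) pvMod
  (h, st.2 ++ [h])

def pvB_hashes (j : Int) (s : List Char) : List Int :=
  if 1 ≤ j ∧ j ≤ (s.length : Int) then
    let h1 := (PySem.List.slice s none (some j)).foldl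
      (fun h c => PySem.Int.mod (h * pvBase + (c.toNat : Int)) pvMod) 0
    let top := PySem.Int.powMod pvBase (j - 1).toNat pvMod
    ((PySem.List.pyRange j (s.length : Int) 1).foldl (pvB_step s j top) (h1, [h1])).2
  else []

def numDirectAcross_alt (seq : String) (seq2 : String) (j : Int) : Int :=
  let hs2 := pvB_hashes j seq2.toList
  let hset := PySem.Set.ofList hs2
  if (PySem.List.enumerate (pvB_hashes j seq.toList) 0).any (fun p =>
      PySem.Set.contains hset p.2 &&
      (PySem.List.enumerate hs2 0).any (fun q =>
        q.2 == p.2 && (PySem.List.slice seq.toList (some p.1) (some (p.1 + j)) ==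
          PySem.List.slice seq2.toList (some q.1) (some (q.1 + j)))))
  then 1 else 0

-- ===== PRECONDITION & SPEC =====
-- Pre_ excludes non-positive window lengths j ≤ 0, outside the function's natural
-- domain: there A returns 1 for any nonempty seq (its still-empty prefix '' matches
-- every string — an accident of its loop state), while B returns 0 (a string has no
-- window of non-positive length); neither value is claimed.
def Pre_numDirectAcross (seq : String) (seq2 : String) (j : Int) : Prop := 1 ≤ j
instance (seq : String) (seq2 : String) (j : Int) : Decidable (Pre_numDirectAcross seq seq2 j) := by unfold Pre_numDirectAcross; infer_instance
def pvWitness_numDirectAcross : String × String × Int := ("ab", "ab", 1)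

-- When the only length-j window of seq occurring in seq2 is the final one (starting
-- at len(seq)-j), A returns 0 because its loop stops before ever testing that window,
-- while B returns 1, the intended answer since that window does occur in seq2.
def D_numDirectAcross (seq : String) (seq2 : String) (j : Int) : Prop :=
  1 ≤ j ∧ j.toNat ≤ seq.toList.length ∧
  PySem.Chars.isIn ((seq.toList.drop (seq.toList.length - j.toNat)).take j.toNat) seq2.toList = true ∧
  ∀ k < seq.toList.length - j.toNat,
    PySem.Chars.isIn ((seq.toList.drop k).take j.toNat) seq2.toList = false
instance (seq : String) (seq2 : String) (j : Int) : Decidable (D_numDirectAcross seq seq2 j) := by unfold D_numDirectAcross; infer_instance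

def Spec_numDirectAcross (seq : String) (seq2 : String) (j : Int) (out : Int) : Prop := ¬ D_numDirectAcross seq seq2 j → out = numDirectAcross_alt seq seq2 j
instance (seq : String) (seq2 : String) (j : Int) (out : Int) : Decidable (Spec_numDirectAcross seq seq2 j out) := by unfold Spec_numDirectAcross; infer_instance

def pvDiffWitness_numDirectAcross : String × String × Int := ("ab", "b", 1)
def pvDiffWitnessOut_numDirectAcross : Int × Int := (0, 1)

-- ===== CLAIM (what is proved, stated in full; the proofs are below) =====
def Claim_unchanged_numDirectAcross : Prop := ∀ (seq : String) (seq2 : String) (j : Int), Dom_numDirectAcross seq seq2 j → Pre_numDirectAcross seq seq2 j → Spec_numDirectAcross seq seq2 j (numDirectAcross seq seq2 j)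
def Claim_changed_numDirectAcross : Prop := Dom_numDirectAcross (pvDiffWitness_numDirectAcross.1) (pvDiffWitness_numDirectAcross.2.1) (pvDiffWitness_numDirectAcross.2.2) ∧ Pre_numDirectAcross (pvDiffWitness_numDirectAcross.1) (pvDiffWitness_numDirectAcross.2.1) (pvDiffWitness_numDirectAcross.2.2) ∧ D_numDirectAcross (pvDiffWitness_numDirectAcross.1) (pvDiffWitness_numDirectAcross.2.1) (pvDiffWitness_numDirectAcross.2.2) ∧ numDirectAcross (pvDiffWitness_numDirectAcross.1) (pvDiffWitness_numDirectAcross.2.1) (pvDiffWitness_numDirectAcross.2.2) = pvDiffWitnessOut_numDirectAcross.1 ∧ numDirectAcross_alt (pvDiffWitness_numDirectAcross.1) (pvDiffWitness_numDirectAcross.2.1) (pvDiffWitness_numDirectAcross.2.2) = pvDiffWitnessOut_numDirectAcross.2 ∧ pvDiffWitnessOut_numDirectAcross.1 ≠ pvDiffWitnessOut_numDirectAcross.2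
def Claim_exact_numDirectAcross : Prop := ∀ (seq : String) (seq2 : String) (j : Int), Dom_numDirectAcross seq seq2 j → Pre_numDirectAcross seq seq2 j → D_numDirectAcross seq seq2 j → numDirectAcross seq seq2 j ≠ numDirectAcross_alt seq seq2 j

-- ===== LEMMAS AND PROOFS =====

-- window abbreviation used only by the proofs
def pvWin (s : List Char) (k jn : Nat) : List Char := (s.drop k).take jn

theorem pvSlice_win (s : List Char) (k jn : Nat) (j : Int) (hj : j = (jn : Int)) :
    PySem.List.slice s (some (k : Int)) (some ((k : Int) + j)) = pvWin s k jn := by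
  subst hj; exact PySem.List.slice_natCast_add s k jn

-- sliding phase of A: at step i (jn ≤ i ≤ len), cur = window starting at i - jn
theorem pvA_slide (s s2 : List Char) (j : Int) (jn : Nat) (hj : j = (jn : Int)) (hjn : 1 ≤ jn)
    (nd : Int) :
    ∀ d i, s.length - i ≤ d → jn ≤ i → i ≤ s.length →
    pvA_loop s s2 j nd (pvWin s (i - jn) jn) i =
      if ∃ k ∈ List.range s.length, i - jn ≤ k ∧ k + jn < s.length ∧
          PySem.Chars.isIn (pvWin s k jn) s2 = true
      then nd + 1 else nd := by
  intro d
  induction d with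
  | zero =>
    intro i hd h1 h2
    have hi : i = s.length := by omega
    rw [pvA_loop, dif_neg (by omega), if_neg]
    rintro ⟨k, _, hk1, hk2, _⟩; omega
  | succ d ih =>
    intro i hd h1 h2
    by_cases hlt : i < s.length
    · rw [pvA_loop, dif_pos hlt]
      rw [if_neg (by omega)]
      by_cases hfound : PySem.Chars.isIn (pvWin s (i - jn) jn) s2 = true
      · rw [if_pos hfound,
          if_pos ⟨i - jn, List.mem_range.2 (by omega), le_refl _, by omega, hfound⟩]
      · rw [if_neg hfound]
        have hstep : PySem.List.slice (pvWin s (i - jn) jn) (some 1) none ++ [s[i]] =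
            pvWin s (i + 1 - jn) jn := by
          rw [PySem.List.slice_from_one]
          have gen : ∀ (a : Char) (l : List Char) (n : Nat), 1 ≤ n →
              List.take n (a :: l) = a :: List.take (n - 1) l := by
            intro a l n hn
            obtain ⟨m, rfl⟩ : ∃ m, n = m + 1 := ⟨n - 1, by omega⟩
            simp
          have hdecomp : pvWin s (i - jn) jn = s[i - jn]'(by omega) :: pvWin s (i - jn + 1) (jn - 1) := by
            rw [pvWin, pvWin, List.drop_eq_getElem_cons (by omega), gen _ _ _ hjn]
          rw [hdecomp]
          simp only [List.tail_cons]
          have hidx : (s.drop (i - jn + 1))[jn - 1]? = some s[i] := by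
            rw [List.getElem?_drop, show i - jn + 1 + (jn - 1) = i from by omega,
              List.getElem?_eq_getElem hlt]
          rw [pvWin, pvWin, show i + 1 - jn = i - jn + 1 from by omega]
          calc (s.drop (i - jn + 1)).take (jn - 1) ++ [s[i]]
              = (s.drop (i - jn + 1)).take ((jn - 1) + 1) := by
                rw [List.take_add_one, hidx]; rfl
            _ = (s.drop (i - jn + 1)).take jn := by congr 1; omega
        rw [hstep, ih (i + 1) (by omega) (by omega) (by omega)]
        by_cases hex : ∃ k ∈ List.range s.length, i + 1 - jn ≤ k ∧ k + jn < s.length ∧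
            PySem.Chars.isIn (pvWin s k jn) s2 = true
        · rw [if_pos hex]
          rcases hex with ⟨k, hk0, hk1, hk2, hk3⟩
          rw [if_pos ⟨k, hk0, by omega, hk2, hk3⟩]
        · rw [if_neg hex, if_neg]
          rintro ⟨k, hk0, hk1, hk2, hk3⟩
          rcases Nat.eq_or_lt_of_le hk1 with hke | hke
          · exact hfound (by rw [← hke] at hk3; exact hk3)
          · exact hex ⟨k, hk0, by omega, hk2, hk3⟩
    · rw [pvA_loop, dif_neg (by omega), if_neg]
      rintro ⟨k, _, hk1, hk2, _⟩; omega

-- build phase of A: for i ≤ jn, cur = s.take i; ends at 0 (len ≤ jn) or reaches i = jn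
theorem pvA_build (s s2 : List Char) (j : Int) (jn : Nat) (hj : j = (jn : Int)) (nd : Int) :
    ∀ d i, jn - i ≤ d → i ≤ jn → i ≤ s.length →
    pvA_loop s s2 j nd (s.take i) i =
      if s.length ≤ jn then nd else pvA_loop s s2 j nd (s.take jn) jn := by
  intro d
  induction d with
  | zero =>
    intro i hd h1 h2
    have hij : i = jn := by omega
    subst hij
    by_cases hle : s.length ≤ i
    · rw [if_pos hle, pvA_loop, dif_neg (by omega)]
    · rw [if_neg (by omega)]
  | succ d ih =>
    intro i hd h1 h2
    rcases Nat.eq_or_lt_of_le h1 with he | hlt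
    · subst he
      by_cases hle : s.length ≤ i
      · rw [if_pos hle, pvA_loop, dif_neg (by omega)]
      · rw [if_neg (by omega)]
    · by_cases hlen : i < s.length
      · rw [pvA_loop, dif_pos hlen, if_pos (by omega)]
        have htake : s.take i ++ [s[i]] = s.take (i + 1) := by
          rw [List.take_add_one, List.getElem?_eq_getElem hlen]; rfl
        rw [htake]
        exact ih (i + 1) (by omega) (by omega) (by omega)
      · rw [pvA_loop, dif_neg hlen, if_pos (by omega)]

-- characterisation of A for j ≥ 1: A = 1 iff some window strictly before the last matches
theorem pvA_char (seq seq2 : String) (j : Int) (jn : Nat) (hj : j = (jn : Int)) (hjn : 1 ≤ jn) :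
    numDirectAcross seq seq2 j =
      if ∃ k ∈ List.range seq.toList.length, k + jn < seq.toList.length ∧
          PySem.Chars.isIn (pvWin seq.toList k jn) seq2.toList = true
      then 1 else 0 := by
  unfold numDirectAcross
  have hb := pvA_build seq.toList seq2.toList j jn hj 0 jn 0 (by omega) (by omega) (by omega)
  rw [List.take_zero] at hb
  by_cases hle : seq.toList.length ≤ jn
  · rw [hb, if_pos hle, if_neg]
    rintro ⟨k, _, hk, _⟩; omega
  · rw [hb, if_neg hle]
    have hs := pvA_slide seq.toList seq2.toList j jn hj hjn 0
      (seq.toList.length - jn) jn (by omega) (le_refl _) (by omega)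
    rw [Nat.sub_self,
      show pvWin seq.toList 0 jn = seq.toList.take jn from by simp [pvWin]] at hs
    rw [hs]
    by_cases hC : ∃ k ∈ List.range seq.toList.length, k + jn < seq.toList.length ∧
        PySem.Chars.isIn (pvWin seq.toList k jn) seq2.toList = true
    · rcases hC with ⟨k, hk0, hk1, hk2⟩
      rw [if_pos ⟨k, hk0, Nat.zero_le k, hk1, hk2⟩, if_pos ⟨k, hk0, hk1, hk2⟩]
      omega
    · rw [if_neg, if_neg hC]
      rintro ⟨k, hk0, _, hk1, hk2⟩
      exact hC ⟨k, hk0, hk1, hk2⟩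

-- 'w in seq2' ↔ w equals some length-jn window of seq2, for w of exact length jn
theorem pvIsIn_win_iff (s2 w : List Char) (jn : Nat) (hjn : 1 ≤ jn) (hw : w.length = jn) :
    PySem.Chars.isIn w s2 = true ↔
      ∃ m, m < s2.length + 1 - jn ∧ w = pvWin s2 m jn := by
  constructor
  · intro hin
    rcases (PySem.Chars.exists_prefix_drop_iff_isIn (s := s2) (sub := w)).2 hin with ⟨m, hpre⟩
    have hlen : w.length ≤ (s2.drop m).length := hpre.length_le
    have heq := List.prefix_iff_eq_take.1 hpre
    simp only [List.length_drop] at hlen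
    exact ⟨m, by omega, by rw [pvWin, ← hw, ← heq]⟩
  · rintro ⟨m, _, rfl⟩
    rw [← PySem.Chars.exists_prefix_drop_iff_isIn]
    exact ⟨m, List.take_prefix _ _⟩

-- the direct polynomial hash of a window, and the hash-state fold of Source B's loops
def pvFoldH (h : Int) (u : List Char) : Int :=
  u.foldl (fun h c => PySem.Int.mod (h * pvBase + (c.toNat : Int)) pvMod) h

def pvH (w : List Char) : Int := pvFoldH 0 w

theorem pvMod_pos : (0 : Int) < pvMod := by decide

theorem pvFoldH_congr : ∀ (u : List Char) (h₁ h₂ : Int), h₁ ≡ h₂ [ZMOD pvMod] →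
    pvFoldH h₁ u ≡ pvFoldH h₂ u [ZMOD pvMod] := by
  intro u
  induction u with
  | nil => intro h₁ h₂ h; exact h
  | cons c u ih =>
    intro h₁ h₂ h
    simp only [pvFoldH, List.foldl_cons]
    refine ih _ _ ?_
    rw [PySem.Int.mod_eq_emod_of_pos pvMod_pos, PySem.Int.mod_eq_emod_of_pos pvMod_pos]
    exact (Int.emod_emod_of_dvd _ dvd_rfl).trans
      (((h.mul_right pvBase).add_right _).trans (Int.emod_emod_of_dvd _ dvd_rfl).symm)

theorem pvFoldH_shift : ∀ (u : List Char) (a b : Int),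
    pvFoldH (a + b) u ≡ a * pvBase ^ u.length + pvFoldH b u [ZMOD pvMod] := by
  intro u
  induction u with
  | nil => intro a b; simp [pvFoldH]
  | cons c u ih =>
    intro a b
    have h1 : pvFoldH (a + b) (c :: u) ≡ pvFoldH ((a + b) * pvBase + (c.toNat : Int)) u [ZMOD pvMod] := by
      simp only [pvFoldH, List.foldl_cons]
      exact pvFoldH_congr u _ _ (by
        rw [PySem.Int.mod_eq_emod_of_pos pvMod_pos]; exact Int.emod_emod_of_dvd _ dvd_rfl)
    have h2 : pvFoldH ((a + b) * pvBase + (c.toNat : Int)) u =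
        pvFoldH (a * pvBase + (b * pvBase + (c.toNat : Int))) u := by ring_nf
    have h3 : pvFoldH (a * pvBase + (b * pvBase + (c.toNat : Int))) u ≡
        a * pvBase * pvBase ^ u.length + pvFoldH (b * pvBase + (c.toNat : Int)) u [ZMOD pvMod] :=
      ih (a * pvBase) _
    have h4 : pvFoldH (b * pvBase + (c.toNat : Int)) u ≡
        pvFoldH b (c :: u) [ZMOD pvMod] := by
      simp only [pvFoldH, List.foldl_cons]
      exact pvFoldH_congr u _ _ (by
        rw [PySem.Int.mod_eq_emod_of_pos pvMod_pos]
        exact (Int.emod_emod_of_dvd _ dvd_rfl).symm)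
    calc pvFoldH (a + b) (c :: u)
        ≡ pvFoldH (a * pvBase + (b * pvBase + (c.toNat : Int))) u [ZMOD pvMod] := by rw [← h2]; exact h1
      _ ≡ a * pvBase * pvBase ^ u.length + pvFoldH (b * pvBase + (c.toNat : Int)) u [ZMOD pvMod] := h3
      _ ≡ a * pvBase * pvBase ^ u.length + pvFoldH b (c :: u) [ZMOD pvMod] := (h4.add_left _)
      _ = a * pvBase ^ (c :: u).length + pvFoldH b (c :: u) := by
          simp [List.length_cons, pow_succ]; ring

theorem pvH_cons (u : List Char) (c : Char) :
    pvH (c :: u) ≡ (c.toNat : Int) * pvBase ^ u.length + pvH u [ZMOD pvMod] := by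
  have h0 : pvH (c :: u) = pvFoldH (PySem.Int.mod (0 * pvBase + (c.toNat : Int)) pvMod) u := by
    simp [pvH, pvFoldH]
  have h1 : pvFoldH (PySem.Int.mod (0 * pvBase + (c.toNat : Int)) pvMod) u ≡
      pvFoldH ((c.toNat : Int) + 0) u [ZMOD pvMod] := by
    refine pvFoldH_congr u _ _ ?_
    rw [PySem.Int.mod_eq_emod_of_pos pvMod_pos]
    have : (0 : Int) * pvBase + (c.toNat : Int) = (c.toNat : Int) + 0 := by ring
    rw [this]
    exact Int.emod_emod_of_dvd _ dvd_rfl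
  have h2 := pvFoldH_shift u ((c.toNat : Int)) 0
  rw [h0]
  exact h1.trans h2

-- appending one character to the hashed window is one hash step
theorem pvH_snoc (u : List Char) (c : Char) :
    pvH (u ++ [c]) = PySem.Int.mod (pvH u * pvBase + (c.toNat : Int)) pvMod := by
  simp [pvH, pvFoldH, List.foldl_append]

-- the rolling update of Source B computes the hash of the next window
theorem pvH_roll (s : List Char) (kk jn : Nat) (hjn : 1 ≤ jn) (hlt : kk + jn < s.length) :
    PySem.Int.mod ((pvH (pvWin s kk jn) -
        ((s[kk]'(by omega)).toNat : Int) * PySem.Int.powMod pvBase (jn - 1) pvMod) * pvBase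
      + ((s[kk + jn]'(by omega)).toNat : Int)) pvMod = pvH (pvWin s (kk + 1) jn) := by
  have gen : ∀ (a : Char) (l : List Char) (n : Nat), 1 ≤ n →
      List.take n (a :: l) = a :: List.take (n - 1) l := by
    intro a l n hn
    obtain ⟨m, rfl⟩ : ∃ m, n = m + 1 := ⟨n - 1, by omega⟩
    simp
  have hdecomp : pvWin s kk jn = s[kk]'(by omega) :: pvWin s (kk + 1) (jn - 1) := by
    rw [pvWin, pvWin, List.drop_eq_getElem_cons (by omega), gen _ _ _ hjn]
  have hidx : (s.drop (kk + 1))[jn - 1]? = some (s[kk + jn]'(by omega)) := by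
    rw [List.getElem?_drop, show kk + 1 + (jn - 1) = kk + jn from by omega,
      List.getElem?_eq_getElem (by omega)]
  have hext : pvWin s (kk + 1) jn = pvWin s (kk + 1) (jn - 1) ++ [s[kk + jn]'(by omega)] := by
    rw [pvWin, pvWin]
    calc (s.drop (kk + 1)).take jn
        = (s.drop (kk + 1)).take ((jn - 1) + 1) := by congr 1; omega
      _ = (s.drop (kk + 1)).take (jn - 1) ++ [s[kk + jn]'(by omega)] := by
          rw [List.take_add_one, hidx]; rfl
  have hu : (pvWin s (kk + 1) (jn - 1)).length = jn - 1 := by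
    simp only [pvWin, List.length_take, List.length_drop]; omega
  rw [hext, pvH_snoc, hdecomp]
  -- both sides are `mod _ pvMod`; reduce to a congruence mod pvMod
  rw [PySem.Int.mod_eq_emod_of_pos pvMod_pos, PySem.Int.mod_eq_emod_of_pos pvMod_pos]
  have hpm : PySem.Int.powMod pvBase (jn - 1) pvMod ≡ pvBase ^ (jn - 1) [ZMOD pvMod] := by
    rw [PySem.Int.powMod_eq_emod _ _ pvMod_pos]
    exact Int.emod_emod_of_dvd _ dvd_rfl
  have hc := pvH_cons (pvWin s (kk + 1) (jn - 1)) (s[kk]'(by omega))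
  rw [hu] at hc
  have key : (pvH (s[kk]'(by omega) :: pvWin s (kk + 1) (jn - 1)) -
        ((s[kk]'(by omega)).toNat : Int) * PySem.Int.powMod pvBase (jn - 1) pvMod) * pvBase
      + ((s[kk + jn]'(by omega)).toNat : Int) ≡
      pvH (pvWin s (kk + 1) (jn - 1)) * pvBase + ((s[kk + jn]'(by omega)).toNat : Int)
      [ZMOD pvMod] := by
    have h5 := ((hc.sub (hpm.mul_left ((s[kk]'(by omega)).toNat : Int))).mul_right pvBase).add_right
      ((s[kk + jn]'(by omega)).toNat : Int)
    refine h5.trans (Int.ModEq.refl _ |>.trans ?_)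
    have : (((s[kk]'(by omega)).toNat : Int) * pvBase ^ (jn - 1) + pvH (pvWin s (kk + 1) (jn - 1)) -
        ((s[kk]'(by omega)).toNat : Int) * pvBase ^ (jn - 1)) * pvBase
        + ((s[kk + jn]'(by omega)).toNat : Int) =
        pvH (pvWin s (kk + 1) (jn - 1)) * pvBase + ((s[kk + jn]'(by omega)).toNat : Int) := by ring
    rw [this]
  exact key

-- the second loop of Source B's window_hashes: state = (hash of current window, hashes so far)
theorem pvB_roll (s : List Char) (jn : Nat) (hjn : 1 ≤ jn) :
    ∀ t : Nat, jn ≤ t → t ≤ s.length →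
    (PySem.List.pyRange (jn : Int) (t : Int) 1).foldl
        (pvB_step s (jn : Int) (PySem.Int.powMod pvBase (((jn : Int) - 1).toNat) pvMod))
        (pvH (pvWin s 0 jn), [pvH (pvWin s 0 jn)])
      = (pvH (pvWin s (t - jn) jn), (List.range (t - jn + 1)).map (fun k => pvH (pvWin s k jn))) := by
  intro t
  induction t with
  | zero => intro h1 h2; omega
  | succ t ih =>
    intro h1 h2
    rcases Nat.eq_or_lt_of_le h1 with he | hlt
    · rw [← he, PySem.List.pyRange_one_eq_nil (by omega), List.foldl_nil]
      simp [List.range_one]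
    · have h1' : jn ≤ t := by omega
      have h2' : t ≤ s.length := by omega
      have hcast : ((t + 1 : Nat) : Int) = (t : Int) + 1 := by push_cast; ring
      rw [hcast, PySem.List.pyRange_one_succ_right (by exact_mod_cast h1'), List.foldl_append,
        ih h1' h2', List.foldl_cons, List.foldl_nil]
      have hget1 : PySem.List.pyGetD s ((t : Int) - (jn : Int)) 'a' = s[t - jn]'(by omega) := by
        rw [show (t : Int) - (jn : Int) = ((t - jn : Nat) : Int) from by push_cast [h1']; ring,
          PySem.List.pyGetD_natCast, List.getD_eq_getElem _ _ (by omega)]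
      have hget2 : PySem.List.pyGetD s (t : Int) 'a' = s[t]'(by omega) := by
        rw [PySem.List.pyGetD_natCast, List.getD_eq_getElem _ _ (by omega)]
      have hexp : (((jn : Int) - 1).toNat) = jn - 1 := by omega
      simp only [pvB_step, hget1, hget2, hexp]
      have hroll := pvH_roll s (t - jn) jn hjn (by omega)
      simp only [show t - jn + jn = t from by omega] at hroll
      rw [hroll]
      have e1 : t + 1 - jn = t - jn + 1 := by omega
      rw [e1]
      simp [List.range_succ]

-- window_hashes(s) is the list of window hashes, one per window start
theorem pvHashes_spec (s : List Char) (j : Int) (jn : Nat) (hj : j = (jn : Int)) (hjn : 1 ≤ jn) :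
    pvB_hashes j s = (List.range (s.length + 1 - jn)).map (fun k => pvH (pvWin s k jn)) := by
  subst hj
  unfold pvB_hashes
  by_cases hle : jn ≤ s.length
  · rw [if_pos ⟨by exact_mod_cast hjn, by exact_mod_cast hle⟩]
    have hh1 : (PySem.List.slice s none (some ((jn : Nat) : Int))).foldl
        (fun h c => PySem.Int.mod (h * pvBase + (c.toNat : Int)) pvMod) 0 = pvH (pvWin s 0 jn) := by
      rw [PySem.List.slice_to_natCast]
      simp [pvH, pvFoldH, pvWin]
    simp only [hh1]
    rw [show s.length + 1 - jn = s.length - jn + 1 from by omega]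
    rw [pvB_roll s jn hjn s.length hle (le_refl _)]
  · rw [if_neg (fun hcon => hle (by exact_mod_cast hcon.2))]
    rw [show s.length + 1 - jn = 0 from by omega, List.range_zero, List.map_nil]

-- characterisation of B for j ≥ 1: B = 1 iff some window (the last included) matches
theorem pvAlt_char (seq seq2 : String) (j : Int) (jn : Nat) (hj : j = (jn : Int)) (hjn : 1 ≤ jn) :
    numDirectAcross_alt seq seq2 j =
      if ∃ k ∈ List.range seq.toList.length, k + jn ≤ seq.toList.length ∧
          PySem.Chars.isIn (pvWin seq.toList k jn) seq2.toList = true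
      then 1 else 0 := by
  simp only [numDirectAcross_alt]
  simp only [pvHashes_spec seq.toList j jn hj hjn, pvHashes_spec seq2.toList j jn hj hjn]
  set s := seq.toList with hs
  set s2 := seq2.toList with hs2v
  set N1 := s.length + 1 - jn with hN1
  set N2 := s2.length + 1 - jn with hN2
  have hwin1 : ∀ k, k + jn ≤ s.length → (pvWin s k jn).length = jn := by
    intro k hk; simp only [pvWin, List.length_take, List.length_drop]; omega
  by_cases hC : ∃ k ∈ List.range s.length, k + jn ≤ s.length ∧
      PySem.Chars.isIn (pvWin s k jn) s2 = true
  · rw [if_pos hC, if_pos]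
    rcases hC with ⟨k, _, hkl, hin⟩
    rcases (pvIsIn_win_iff s2 (pvWin s k jn) jn hjn (hwin1 k hkl)).1 hin with ⟨m, hm, hweq⟩
    have hk1 : k < N1 := by omega
    rw [List.any_eq_true]
    refine ⟨((0 : Int) + (k : Int), pvH (pvWin s k jn)), ?_, ?_⟩
    · rw [PySem.List.mem_enumerate_iff]
      exact ⟨k, by simpa using hk1, by simp [hk1]⟩
    · rw [Bool.and_eq_true]
      constructor
      · rw [PySem.Set.contains_iff, PySem.Set.mem_ofList, hweq]
        exact List.mem_map.2 ⟨m, List.mem_range.2 hm, rfl⟩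
      · rw [List.any_eq_true]
        refine ⟨((0 : Int) + (m : Int), pvH (pvWin s2 m jn)), ?_, ?_⟩
        · rw [PySem.List.mem_enumerate_iff]
          exact ⟨m, by simpa using hm, by simp [hm]⟩
        · rw [Bool.and_eq_true, beq_iff_eq, beq_iff_eq]
          refine ⟨by rw [hweq], ?_⟩
          simp only [zero_add]
          rw [pvSlice_win s k jn j hj, pvSlice_win s2 m jn j hj, hweq]
  · rw [if_neg hC, if_neg]
    rw [List.any_eq_true]
    rintro ⟨p, hp, hpred⟩
    rcases (PySem.List.mem_enumerate_iff _ _ _).1 hp with ⟨k, hk, rfl⟩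
    have hk1 : k < N1 := by simpa using hk
    simp only [Bool.and_eq_true, List.any_eq_true, beq_iff_eq] at hpred
    rcases hpred with ⟨-, q, hq, hq2⟩
    rcases (PySem.List.mem_enumerate_iff _ _ _).1 hq with ⟨m, hm, rfl⟩
    have hm1 : m < N2 := by simpa using hm
    rcases hq2 with ⟨-, hslice⟩
    simp only [zero_add] at hslice
    rw [pvSlice_win s k jn j hj, pvSlice_win s2 m jn j hj] at hslice
    have hkl : k + jn ≤ s.length := by omega
    refine hC ⟨k, List.mem_range.2 (by omega), hkl, ?_⟩
    exact (pvIsIn_win_iff s2 (pvWin s k jn) jn hjn (hwin1 k hkl)).2 ⟨m, hm1, hslice⟩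

-- ===== VERDICT (by name: the statements are the Claim_ definitions above) =====
theorem numDirectAcross_spec : Claim_unchanged_numDirectAcross := by
  intro seq seq2 j _ hpre hnd
  have hp : (1 : Int) ≤ j := hpre
  have hj' : j = ((j.toNat : Nat) : Int) := by omega
  have hjn : 1 ≤ j.toNat := by omega
  rw [pvA_char seq seq2 j j.toNat hj' hjn, pvAlt_char seq seq2 j j.toNat hj' hjn]
  set n := seq.toList.length with hn
  by_cases hA : ∃ k ∈ List.range n, k + j.toNat < n ∧
      PySem.Chars.isIn (pvWin seq.toList k j.toNat) seq2.toList = true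
  · rcases hA with ⟨k, hk0, hk1, hk2⟩
    rw [if_pos ⟨k, hk0, hk1, hk2⟩, if_pos ⟨k, hk0, by omega, hk2⟩]
  · rw [if_neg hA, if_neg]
    rintro ⟨k, hk0, hk1, hk2⟩
    rcases lt_or_eq_of_le hk1 with hlt | heq
    · exact hA ⟨k, hk0, hlt, hk2⟩
    · -- k is the last window start; ¬D_ forces an earlier match, contradicting hA
      apply hnd
      refine ⟨hp, by omega, ?_, ?_⟩
      · have hkk : k = n - j.toNat := by omega
        rw [← hn, ← hkk]; exact hk2
      · intro m hm
        by_contra hneq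
        exact hA ⟨m, List.mem_range.2 (by omega), by omega,
          by simpa using hneq⟩

theorem numDirectAcross_changed : Claim_changed_numDirectAcross := by
  unfold Claim_changed_numDirectAcross
  refine ⟨by decide, by decide, by decide, ?_, by decide, by decide⟩
  show numDirectAcross "ab" "b" 1 = 0
  rw [pvA_char "ab" "b" 1 1 (by norm_num) (by omega)]
  decide

theorem numDirectAcross_tight : Claim_exact_numDirectAcross := by
  intro seq seq2 j _ hpre hd
  obtain ⟨hj1, hjlen, hlast, hnone⟩ := hd
  have hj' : j = ((j.toNat : Nat) : Int) := by omega
  have hjn : 1 ≤ j.toNat := by omega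
  rw [pvA_char seq seq2 j j.toNat hj' hjn, pvAlt_char seq seq2 j j.toNat hj' hjn]
  set n := seq.toList.length with hn
  rw [if_neg, if_pos]
  · decide
  · exact ⟨n - j.toNat, List.mem_range.2 (by omega), by omega, hlast⟩
  · rintro ⟨k, hk0, hk1, hk2⟩
    have := hnone k (by omega)
    rw [pvWin] at hk2
    rw [this] at hk2
    exact Bool.false_ne_true hk2
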